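-- pv_equiv track=rewrite | github.com/starryboram/Algorithm | Programmers/Level2/13. 귤 고르기.py | solution
-- ===== SOURCE A (Python) =====
-- def solution(k, tangerine):
--     set_tangerine = set(tangerine)
--     answer = [tangerine.count(i) for i in set_tangerine]
--     answer = list(reversed(sorted(answer)))
--     cnt = 0
--     sum = 0
--
--     if answer[0] >= k:
--         return 1
--     else:
--         for i in answer:
--             sum += i
--             cnt += 1
--             if sum >= k:
--                 return cnt
-- ===== SOURCE B (Python) =====
-- def solution(k, tangerine):
--     # counting-sort style: bucket distinct kinds by their count, then walk
--     # bucket sizes from the largest possible count down -- no comparison sort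
--     counts = {}
--     for t in tangerine:
--         counts[t] = counts.get(t, 0) + 1
--     freq = {}                      # freq[c] = number of kinds with exactly c tangerines
--     for c in counts.values():
--         freq[c] = freq.get(c, 0) + 1
--     cnt = 0
--     remaining = k
--     for c in range(len(tangerine), 0, -1):
--         for _ in range(freq.get(c, 0)):
--             remaining -= c
--             cnt += 1
--             if remaining <= 0:
--                 return cnt
-- ===== Notes on version B (the rewrite author's own statement) =====
-- stated objective: faster
-- what changed: replaces set+per-element count() and a comparison sort with a one-pass count dict, a second histogram of the counts (freq-of-freq), and a counting-sort style downward walk over possible count values instead of sorting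
-- outside the precondition, e.g. on solution(5, [1, 1]): A returns None, B returns None; on solution(1, []): A raises IndexError, B returns None
import Mathlib
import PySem

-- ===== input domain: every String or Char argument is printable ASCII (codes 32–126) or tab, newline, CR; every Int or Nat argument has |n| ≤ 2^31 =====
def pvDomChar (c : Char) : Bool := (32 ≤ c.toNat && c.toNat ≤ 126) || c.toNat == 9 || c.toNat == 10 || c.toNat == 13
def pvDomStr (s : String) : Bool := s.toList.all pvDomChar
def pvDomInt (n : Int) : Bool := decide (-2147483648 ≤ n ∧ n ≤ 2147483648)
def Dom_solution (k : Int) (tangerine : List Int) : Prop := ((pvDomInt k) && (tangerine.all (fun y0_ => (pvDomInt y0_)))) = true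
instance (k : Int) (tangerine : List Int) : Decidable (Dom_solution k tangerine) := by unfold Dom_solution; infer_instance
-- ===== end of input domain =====

-- B is faster: count dict + histogram of counts + counting-sort style downward walk, no comparison sort; return-value equivalence only.

-- ===== PORT A =====
-- the 'for i in answer: sum += i; cnt += 1; if sum >= k: return cnt' loop (falling off the end → 0, outside Pre_)
def solutionLoopA (k : Int) : List Int → Int → Int → Int
  | [], _, _ => 0
  | i :: rest, sum, cnt =>
      let s := sum + i
      let c := cnt + 1
      if s ≥ k then c else solutionLoopA k rest s c

def solution (k : Int) (tangerine : List Int) : Int :=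
  let set_tangerine := PySem.Set.ofList tangerine
  let answer := set_tangerine.map (fun i => (PySem.List.count tangerine i : Int))
  let answer := (PySem.List.sorted answer (fun x => x)).reverse
  match PySem.List.pyGet? answer 0 with
  | none => 0   -- IndexError in Python (empty tangerine), outside Pre_
  | some a0 => if a0 ≥ k then 1 else solutionLoopA k answer 0 0

-- ===== PORT B =====
-- inner 'for _ in range(m): remaining -= c; cnt += 1; if remaining <= 0: return cnt'
def solutionInnerB (c : Int) : Nat → Int → Int → Option Int × Int × Int
  | 0, remaining, cnt => (none, remaining, cnt)
  | m + 1, remaining, cnt =>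
      let r := remaining - c
      let n := cnt + 1
      if r ≤ 0 then (some n, r, n) else solutionInnerB c m r n

-- outer 'for c in range(len(tangerine), 0, -1): …' (fall-off → 0, outside Pre_)
def solutionOuterB (freq : PySem.Dict Int Int) : List Int → Int → Int → Int
  | [], _, _ => 0
  | c :: rest, remaining, cnt =>
      match solutionInnerB c (freq.getD c 0).toNat remaining cnt with
      | (some ans, _, _) => ans
      | (none, r, n) => solutionOuterB freq rest r n

def solution_alt (k : Int) (tangerine : List Int) : Int :=
  let counts := tangerine.foldl (fun d t => d.insert t (d.getD t 0 + 1)) PySem.Dict.empty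
  let freq := counts.values.foldl (fun d c => d.insert c (d.getD c 0 + 1)) PySem.Dict.empty
  solutionOuterB freq (PySem.List.pyRange (tangerine.length : Int) 0 (-1)) k 0

-- ===== PRECONDITION & SPEC =====
-- Pre_ excludes inputs where Python A does not return an int: the empty list (IndexError on answer[0])
-- and k > len(tangerine), where the loop falls off the end and A returns None.
def Pre_solution (k : Int) (tangerine : List Int) : Prop :=
  tangerine ≠ [] ∧ k ≤ (tangerine.length : Int)
instance (k : Int) (tangerine : List Int) : Decidable (Pre_solution k tangerine) := by
  unfold Pre_solution; infer_instance
def pvWitness_solution : Int × List Int := (3, [1, 2, 2, 3])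

def Spec_solution (k : Int) (tangerine : List Int) (out : Int) : Prop := out = solution_alt k tangerine
instance (k : Int) (tangerine : List Int) (out : Int) : Decidable (Spec_solution k tangerine out) := by
  unfold Spec_solution; infer_instance

-- ===== CLAIM (what is proved, stated in full; the proofs are below) =====
def Claim_equal_solution : Prop := ∀ (k : Int) (tangerine : List Int), Dom_solution k tangerine → Pre_solution k tangerine → Spec_solution k tangerine (solution k tangerine)

-- ===== LEMMAS AND PROOFS =====

-- the flat greedy loop both programs reduce to
def loopFlat : List Int → Int → Int → Int
  | [], _, _ => 0
  | c :: rest, remaining, cnt =>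
      if remaining - c ≤ 0 then cnt + 1 else loopFlat rest (remaining - c) (cnt + 1)

-- A's loop is loopFlat with remaining = k - sum
theorem loopA_eq_flat (l : List Int) (k sum cnt : Int) :
    solutionLoopA k l sum cnt = loopFlat l (k - sum) cnt := by
  induction l generalizing sum cnt with
  | nil => rfl
  | cons i rest ih =>
      simp only [solutionLoopA, loopFlat]
      have h : (sum + i ≥ k) ↔ (k - sum - i ≤ 0) := by omega
      by_cases hc : sum + i ≥ k
      · rw [if_pos hc, if_pos (h.mp hc)]
      · rw [if_neg hc, if_neg (fun hh => hc (h.mpr hh)), ih]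
        congr 1; omega

-- B's inner bucket loop, with its continuation, is loopFlat on a replicate block
theorem innerB_flat (c : Int) (m : Nat) (r n : Int) (rest : List Int) :
    (match solutionInnerB c m r n with
     | (some a, _, _) => a
     | (none, r', n') => loopFlat rest r' n') = loopFlat (List.replicate m c ++ rest) r n := by
  induction m generalizing r n with
  | zero => rfl
  | succ m ih =>
      simp only [solutionInnerB, List.replicate_succ, List.cons_append, loopFlat]
      by_cases hc : r - c ≤ 0
      · rw [if_pos hc, if_pos hc]
      · rw [if_neg hc, if_neg hc, ih]

-- B's outer loop is loopFlat on the flattened bucket list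
theorem outerB_flat (freq : PySem.Dict Int Int) (cs : List Int) (r n : Int) :
    solutionOuterB freq cs r n
      = loopFlat (cs.flatMap (fun c => List.replicate (freq.getD c 0).toNat c)) r n := by
  induction cs generalizing r n with
  | nil => rfl
  | cons c rest ih =>
      simp only [solutionOuterB, List.flatMap_cons]
      rw [← innerB_flat c ((freq.getD c 0).toNat) r n]
      cases h : solutionInnerB c ((freq.getD c 0).toNat) r n with
      | mk o p =>
          cases o with
          | some a => simp
          | none => cases p with | mk r' n' => simp [ih]

-- count of any value in the flattened bucket list
theorem count_flatMap_replicate (cs : List Int) (f : Int → Nat) (hnd : cs.Nodup) (a : Int) :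
    (cs.flatMap (fun c => List.replicate (f c) c)).count a = if a ∈ cs then f a else 0 := by
  induction cs with
  | nil => simp
  | cons c rest ih =>
      rcases List.nodup_cons.mp hnd with ⟨hc, hrest⟩
      simp only [List.flatMap_cons, List.count_append, List.mem_cons, ih hrest]
      by_cases hac : a = c
      · subst hac
        simp [hc]
      · simp [List.count_replicate, hac, Ne.symm hac]

-- the flattened bucket list is nonincreasing when the buckets strictly decrease
theorem pairwise_ge_flatMap_replicate (cs : List Int) (f : Int → Nat)
    (hp : cs.Pairwise (· > ·)) :
    (cs.flatMap (fun c => List.replicate (f c) c)).Pairwise (fun a b => -a ≤ -b) := by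
  induction cs with
  | nil => simp
  | cons c rest ih =>
      rcases List.pairwise_cons.mp hp with ⟨hgt, hrest⟩
      simp only [List.flatMap_cons]
      rw [List.pairwise_append]
      refine ⟨?_, ih hrest, ?_⟩
      · rw [List.pairwise_replicate]; right; exact le_rfl
      · intro x hx y hy
        rcases List.mem_flatMap.mp hy with ⟨c', hc', hy'⟩
        have h1 := List.eq_of_mem_replicate hx
        have h2 := List.eq_of_mem_replicate hy'
        have h3 := hgt c' hc'
        omega

-- range(n, 0, -1) is strictly decreasing
theorem pairwise_gt_pyRange_down (a : Int) :
    (PySem.List.pyRange a 0 (-1)).Pairwise (· > ·) := by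
  rw [PySem.List.pyRange_neg_one_eq_reverse, List.pairwise_reverse]
  exact PySem.List.pairwise_lt_pyRange_one 1 (a + 1)

-- B's value list (counts dict values) is A's answer list (before sorting)
theorem values_eq (tangerine : List Int) :
    (tangerine.foldl (fun d t => d.insert t (d.getD t 0 + 1)) PySem.Dict.empty).values
      = (PySem.Set.ofList tangerine).map (fun i => (PySem.List.count tangerine i : Int)) := by
  rw [PySem.Dict.foldl_insert_getD_add_one_eq_counter]
  rw [PySem.Dict.values_eq_map_keys _ (PySem.Dict.nodup_keys_counter _) 0]
  rw [PySem.Dict.keys_counter]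
  apply List.map_congr_left
  intro x _
  rw [PySem.Dict.getD_counter, PySem.List.count_eq]

-- the flattened bucket list IS the descending answer list
theorem flat_eq_answer (tangerine : List Int) (vals : List Int)
    (hmem : ∀ v ∈ vals, 0 < v ∧ v ≤ (tangerine.length : Int)) :
    ((PySem.List.pyRange (tangerine.length : Int) 0 (-1)).flatMap
        (fun c => List.replicate (vals.count c) c))
      = (PySem.List.sorted vals (fun x => x)).reverse := by
  have hpr := pairwise_gt_pyRange_down (tangerine.length : Int)
  have hnd : (PySem.List.pyRange (tangerine.length : Int) 0 (-1)).Nodup :=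
    hpr.imp (fun h => ne_of_gt h)
  apply PySem.List.eq_of_perm_of_pairwise_le_of_injective (key := fun x : Int => -x)
  · intro a b hab
    have h : -a = -b := hab
    omega
  · -- permutation: counts agree
    refine List.Perm.trans (List.perm_iff_count.mpr ?_) ((PySem.List.sorted_perm vals (fun x => x) false).symm.trans (List.reverse_perm _).symm)
    intro a
    rw [count_flatMap_replicate _ _ hnd a]
    by_cases hav : a ∈ vals
    · rw [if_pos]
      rw [PySem.List.mem_pyRange_neg_one]
      exact ⟨(hmem a hav).1, (hmem a hav).2⟩
    · rw [List.count_eq_zero_of_not_mem hav]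
      split <;> rfl
  · exact pairwise_ge_flatMap_replicate _ _ hpr
  · rw [List.pairwise_reverse]
    exact (PySem.List.sorted_pairwise vals (fun x => x)).imp (fun h => neg_le_neg h)

-- ===== VERDICT (by name: the statement is the Claim_ definition above) =====
theorem solution_spec : Claim_equal_solution := by
  intro k tangerine _ hpre
  unfold Spec_solution
  simp only [solution, solution_alt]
  rw [values_eq, outerB_flat]
  -- freq dict lookups are counts in the values list
  rw [PySem.Dict.foldl_insert_getD_add_one_eq_counter]
  simp only [PySem.Dict.getD_counter, Int.toNat_natCast]
  rw [flat_eq_answer tangerine _ (by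
    intro v hv
    rcases List.mem_map.mp hv with ⟨i, hi, rfl⟩
    rw [PySem.Set.mem_ofList] at hi
    exact ⟨by exact_mod_cast List.count_pos_iff.mpr hi,
           by exact_mod_cast List.count_le_length⟩)]
  -- now both sides are about the same descending list
  have hne : ((PySem.List.sorted ((PySem.Set.ofList tangerine).map
      (fun i => (PySem.List.count tangerine i : Int))) (fun x => x)).reverse) ≠ [] := by
    simp only [ne_eq, List.reverse_eq_nil_iff, PySem.List.sorted_eq_nil_iff,
      List.map_eq_nil_iff]
    intro hset
    apply hpre.1
    cases htang : tangerine with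
    | nil => rfl
    | cons x xs =>
        exfalso
        have hx : x ∈ PySem.Set.ofList tangerine := by
          rw [PySem.Set.mem_ofList, htang]; simp
        rw [hset] at hx
        simp at hx
  cases hl : ((PySem.List.sorted ((PySem.Set.ofList tangerine).map
      (fun i => (PySem.List.count tangerine i : Int))) (fun x => x)).reverse) with
  | nil => exact absurd hl hne
  | cons a t =>
      simp only [PySem.List.pyGet?, PySem.List.pyIdx?]
      norm_num
      by_cases hge : a ≥ k
      · rw [if_pos hge]
        simp only [loopFlat]
        rw [if_pos (by omega)]
        norm_num
      · rw [if_neg hge]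
        have hb := loopA_eq_flat (a :: t) k 0 0
        norm_num at hb
        exact hb
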